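-- pv_equiv track=rewrite | github.com/Leogendra/AdventOfCode | 2021/day4/day4.py | grilles
-- ===== SOURCE A (Python) =====
-- def grilles(tab):
--     T = []
--     n = int(len(tab) / 6)
--     for i in range(n):
--         grille = []
--         for j in range(5):
--             grille.append(tab[1 + j + (6 * i)])
--         T.append(grille)
--     return T
-- ===== SOURCE B (Python) =====
-- def grilles(tab):
--     rows = [row for idx, row in enumerate(tab) if idx % 6 != 0]
--     return [rows[5 * i:5 * i + 5] for i in range(len(rows) // 5)]
-- ===== Notes on version B (the rewrite author's own statement) =====
-- stated objective: alternative
-- what changed: Replaces A's nested index arithmetic tab[1+j+6*i] with a filter pass (drop every 6th row by enumerate idx % 6) followed by fixed-size chunking of the flat list into groups of 5.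
import Mathlib
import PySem

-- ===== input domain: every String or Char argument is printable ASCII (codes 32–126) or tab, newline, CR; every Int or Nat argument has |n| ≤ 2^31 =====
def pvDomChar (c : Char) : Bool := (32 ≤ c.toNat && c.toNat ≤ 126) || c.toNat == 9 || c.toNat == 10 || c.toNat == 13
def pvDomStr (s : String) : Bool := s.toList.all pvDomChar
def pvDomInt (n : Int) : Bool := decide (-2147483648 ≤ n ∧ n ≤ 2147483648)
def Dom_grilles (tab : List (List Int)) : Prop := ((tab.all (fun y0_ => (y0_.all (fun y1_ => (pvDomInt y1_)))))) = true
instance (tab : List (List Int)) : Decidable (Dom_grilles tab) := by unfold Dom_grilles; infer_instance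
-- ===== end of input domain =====

-- B decomposes differently: filter out every 6th row (the separators), then chunk the flat list into groups of 5 (alternative decomposition, same cost).

-- ===== PORT A =====
-- A's indices 1+j+6*i are always in range (< 6*(len/6) ≤ len), so pyGetD with default [] is exact.
def grilles (tab : List (List Int)) : List (List (List Int)) :=
  let n := tab.length / 6
  (List.range n).foldl (fun T i =>
    T ++ [(List.range 5).foldl (fun grille j =>
            grille ++ [PySem.List.pyGetD tab ((1 + j + 6 * i : Nat) : Int) []]) []]) []

-- ===== PORT B =====
def grilles_alt (tab : List (List Int)) : List (List (List Int)) :=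
  let rows := (PySem.List.enumerate tab).filterMap
    (fun p => if PySem.Int.mod p.1 6 ≠ 0 then some p.2 else none)
  (List.range (rows.length / 5)).map (fun i =>
    PySem.List.slice rows (some ((5 * i : Nat) : Int)) (some ((5 * i + 5 : Nat) : Int)))

-- ===== PRECONDITION & SPEC =====
def Spec_grilles (tab : List (List Int)) (out : List (List (List Int))) : Prop := out = grilles_alt tab
instance (tab : List (List Int)) (out : List (List (List Int))) : Decidable (Spec_grilles tab out) := by unfold Spec_grilles; infer_instance

-- ===== CLAIM (what is proved, stated in full; the proofs are below) =====
def Claim_equal_grilles : Prop := ∀ (tab : List (List Int)), Dom_grilles tab → Spec_grilles tab (grilles tab)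

-- ===== LEMMAS AND PROOFS =====

-- common recursive characterisation of both programs: skip one row, take 5, repeat
def chunk6 : List (List Int) → List (List (List Int))
  | _ :: b :: c :: d :: e :: f :: rest => [b, c, d, e, f] :: chunk6 rest
  | _ => []

-- ---- A side ----

lemma getD_add6 (a b c d e f : List Int) (rest : List (List Int)) (k : Nat) :
    (a :: b :: c :: d :: e :: f :: rest).getD (k + 6) ([] : List Int) = rest.getD k [] := by
  simp [show k + 6 = k+1+1+1+1+1+1 from rfl]

lemma inner5 (l : List (List Int)) (i : Nat) :
    (List.range 5).map (fun j => l.getD (1 + j + 6 * i) ([] : List Int)) =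
    [l.getD (1+0+6*i) [], l.getD (1+1+6*i) [], l.getD (1+2+6*i) [], l.getD (1+3+6*i) [], l.getD (1+4+6*i) []] := by
  rfl

lemma A_map_eq (tab : List (List Int)) :
    (List.range (tab.length / 6)).map (fun i =>
      (List.range 5).map (fun j => tab.getD (1 + j + 6 * i) [])) = chunk6 tab := by
  induction tab using chunk6.induct with
  | case1 a b c d e f rest ih =>
      simp only [List.length_cons, inner5]
      have h6 : (rest.length + 1 + 1 + 1 + 1 + 1 + 1) / 6 = rest.length / 6 + 1 := by omega
      rw [h6, List.range_succ_eq_map, List.map_cons, List.map_map, chunk6]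
      refine List.cons_eq_cons.mpr ⟨rfl, ?_⟩
      rw [← ih]; simp only [inner5]
      apply List.map_congr_left
      intro i _
      have e1 : ∀ k : Nat, k + 6 * (i+1) = (k + 6*i) + 6 := by omega
      simp only [Function.comp, Nat.succ_eq_add_one, e1, getD_add6]
  | case2 tab h =>
      rcases tab with _|⟨x1,_|⟨x2,_|⟨x3,_|⟨x4,_|⟨x5,_|⟨x6,r⟩⟩⟩⟩⟩⟩
      · rfl
      · simp [chunk6]
      · simp [chunk6]
      · simp [chunk6]
      · simp [chunk6]
      · simp [chunk6]
      · exact absurd rfl (h x1 x2 x3 x4 x5 x6 r)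

lemma grilles_eq_chunk6 (tab : List (List Int)) : grilles tab = chunk6 tab := by
  show (List.range (tab.length / 6)).foldl _ [] = _
  simp only [PySem.List.foldl_append_singleton_eq_map, PySem.List.pyGetD_natCast]
  exact A_map_eq tab

-- ---- B side ----

def rowF : Int × List Int → Option (List Int) :=
  fun p => if PySem.Int.mod p.1 6 ≠ 0 then some p.2 else none

def rowsFrom (s : Int) (l : List (List Int)) : List (List Int) :=
  (PySem.List.enumerate l s).filterMap rowF

def chunkRows (rows : List (List Int)) : List (List (List Int)) :=
  (List.range (rows.length / 5)).map (fun i =>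
    PySem.List.slice rows (some ((5 * i : Nat) : Int)) (some ((5 * i + 5 : Nat) : Int)))

lemma mod6 (s : Int) (k : Nat) (h : PySem.Int.mod s 6 = 0) (hk : 1 ≤ k) (hk5 : k ≤ 5) :
    PySem.Int.mod (s + k) 6 ≠ 0 := by
  rw [PySem.Int.mod_eq_emod_of_pos (by omega)] at h ⊢
  omega

lemma rows_six (a b c d e f : List Int) (rest : List (List Int)) (s : Int)
    (h : PySem.Int.mod s 6 = 0) :
    rowsFrom s (a :: b :: c :: d :: e :: f :: rest) =
      b :: c :: d :: e :: f :: rowsFrom (s + 6) rest := by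
  unfold rowsFrom
  simp only [PySem.List.enumerate_cons, List.filterMap_cons]
  rw [show rowF (s, a) = none from if_neg (fun hne => hne h)]
  rw [show rowF (s + 1, b) = some b from if_pos (mod6 s 1 h (by omega) (by omega))]
  rw [show rowF (s + 1 + 1, c) = some c from if_pos (by have := mod6 s 2 h (by omega) (by omega); simpa [add_assoc] using this)]
  rw [show rowF (s + 1 + 1 + 1, d) = some d from if_pos (by have := mod6 s 3 h (by omega) (by omega); simpa [add_assoc] using this)]
  rw [show rowF (s + 1 + 1 + 1 + 1, e) = some e from if_pos (by have := mod6 s 4 h (by omega) (by omega); simpa [add_assoc] using this)]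
  rw [show rowF (s + 1 + 1 + 1 + 1 + 1, f) = some f from if_pos (by have := mod6 s 5 h (by omega) (by omega); simpa [add_assoc] using this)]
  norm_num [add_assoc]

lemma drop_add5 (b c d e f : List Int) (tail : List (List Int)) (k : Nat) :
    (b :: c :: d :: e :: f :: tail).drop (k + 5) = tail.drop k := by
  simp [show k + 5 = k+1+1+1+1+1 from rfl]

lemma chunkRows_five (b c d e f : List Int) (tail : List (List Int)) :
    chunkRows (b :: c :: d :: e :: f :: tail) = [b, c, d, e, f] :: chunkRows tail := by
  unfold chunkRows
  simp only [List.length_cons]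
  have h5 : (tail.length + 1 + 1 + 1 + 1 + 1) / 5 = tail.length / 5 + 1 := by omega
  rw [h5, List.range_succ_eq_map, List.map_cons, List.map_map]
  refine List.cons_eq_cons.mpr ⟨?_, ?_⟩
  · rw [show ((5 * 0 : Nat) : Int) = ((0:Nat) : Int) from rfl,
        show ((5 * 0 + 5 : Nat) : Int) = ((5:Nat) : Int) from rfl,
        PySem.List.slice_natCast]
    rfl
  · apply List.map_congr_left
    intro i _
    simp only [Function.comp, Nat.succ_eq_add_one, PySem.List.slice_natCast]
    rw [show 5 * (i+1) = 5 * i + 5 from by omega, drop_add5]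
    congr 1
    omega

lemma chunk6_short (tab : List (List Int)) (h : tab.length < 6) : chunk6 tab = [] := by
  rw [chunk6.eq_def]
  split
  · rename_i a b c d e f rest
    simp at h
    omega
  · rfl

lemma rows_skip (x : List Int) (l : List (List Int)) (s : Int)
    (h : PySem.Int.mod s 6 = 0) :
    rowsFrom s (x :: l) = rowsFrom (s + 1) l := by
  unfold rowsFrom
  rw [PySem.List.enumerate_cons, List.filterMap_cons,
      show rowF (s, x) = none from if_neg (fun hne => hne h)]

lemma rowsFrom_len_le (s : Int) (l : List (List Int)) :
    (rowsFrom s l).length ≤ l.length := by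
  unfold rowsFrom
  calc ((PySem.List.enumerate l s).filterMap rowF).length
      ≤ (PySem.List.enumerate l s).length := List.length_filterMap_le _ _
    _ = l.length := PySem.List.length_enumerate l s

lemma alt_core (tab : List (List Int)) : ∀ (s : Int), PySem.Int.mod s 6 = 0 →
    chunkRows (rowsFrom s tab) = chunk6 tab := by
  induction tab using chunk6.induct with
  | case1 a b c d e f rest ih =>
      intro s hs
      rw [rows_six a b c d e f rest s hs, chunkRows_five, chunk6]
      refine congrArg _ (ih (s + 6) ?_)
      rw [PySem.Int.mod_eq_emod_of_pos (by omega)] at hs ⊢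
      omega
  | case2 tab h =>
      intro s hs
      have hlen : tab.length < 6 := by
        rcases tab with _|⟨x1,_|⟨x2,_|⟨x3,_|⟨x4,_|⟨x5,_|⟨x6,r⟩⟩⟩⟩⟩⟩
        · simp
        · simp
        · simp
        · simp
        · simp
        · simp
        · exact absurd rfl (h x1 x2 x3 x4 x5 x6 r)
      rw [chunk6_short tab hlen]
      have hrows : (rowsFrom s tab).length < 5 := by
        rcases tab with _|⟨x, l⟩
        · simp [rowsFrom, PySem.List.enumerate]
        · rw [rows_skip x l s hs]
          have := rowsFrom_len_le (s+1) l
          simp at hlen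
          omega
      unfold chunkRows
      rw [show (rowsFrom s tab).length / 5 = 0 from by omega]
      rfl

lemma alt_eq_chunk6 (tab : List (List Int)) : grilles_alt tab = chunk6 tab := by
  have : grilles_alt tab = chunkRows (rowsFrom 0 tab) := rfl
  rw [this]
  exact alt_core tab 0 (by decide)

-- ===== VERDICT (by name: the statement is the Claim_ definition above) =====
theorem grilles_spec : Claim_equal_grilles := by
  intro tab _
  unfold Spec_grilles
  rw [grilles_eq_chunk6, alt_eq_chunk6]
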